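-- pv_equiv track=rewrite | github.com/nbarker2021/Aletheia2 | unified/all_cqe/CQEPlus_auto/CQEPlus_auto_full_docs__fb6daa5636__agrmmdhg.py | _generate_corner_points
-- ===== SOURCE A (Python) =====
-- from typing import Any, Dict, List, Tuple, Set, Optional, Union
--
-- def _generate_corner_points(dimension_sizes: List[int]) -> List[Tuple]:
--     """ Generate corner points for a multi-dimensional space. """
--     if not dimension_sizes: return []
--     corners = []
--     num_dims = len(dimension_sizes)
--     num_corners = 2 ** num_dims
--     for i in range(num_corners):
--         corner = []
--         for d in range(num_dims):
--             # Use bit masking to determine min (0) or max (size-1) for each dimension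
--             if (i >> d) & 1:
--                 corner.append(max(0, dimension_sizes[d] - 1)) # Use max index
--             else:
--                 corner.append(0) # Use min index
--         corners.append(tuple(corner))
--     return corners
-- ===== SOURCE B (Python) =====
-- def _generate_corner_points(dimension_sizes):
--     """ Generate corner points for a multi-dimensional space. """
--     if not dimension_sizes:
--         return []
--     corners = [()]
--     for size in dimension_sizes:
--         hi = max(0, size - 1)
--         corners = [c + (0,) for c in corners] + [c + (hi,) for c in corners]
--     return corners
-- ===== Notes on version B (the rewrite author's own statement) =====
-- stated objective: alternative
-- what changed: Replaces the range(2**n) loop with per-corner bit masking and repeated dimension_sizes[d] indexing by building the corner list incrementally, doubling it once per dimension (zero-branch copies first, then max-branch copies), which reproduces A's LSB-first ordering.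
import Mathlib
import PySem

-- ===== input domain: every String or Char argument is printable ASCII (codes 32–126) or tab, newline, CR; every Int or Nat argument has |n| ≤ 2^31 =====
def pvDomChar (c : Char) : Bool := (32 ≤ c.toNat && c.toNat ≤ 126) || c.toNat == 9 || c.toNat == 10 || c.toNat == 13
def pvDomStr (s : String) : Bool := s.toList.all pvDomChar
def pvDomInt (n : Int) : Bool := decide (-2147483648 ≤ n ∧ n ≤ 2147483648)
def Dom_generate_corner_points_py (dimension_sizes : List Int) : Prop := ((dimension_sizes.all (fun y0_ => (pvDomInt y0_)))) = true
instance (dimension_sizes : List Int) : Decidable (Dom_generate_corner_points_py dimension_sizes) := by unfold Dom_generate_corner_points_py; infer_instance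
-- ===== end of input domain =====

-- B replaces A's bit-mask enumeration of range(2**n) by doubling the corner list once per
-- dimension, avoiding per-corner bit arithmetic and repeated indexing (objective: alternative).

-- ===== PORT A =====
-- literal port of A; i and d come from pyRange so 0 ≤ i, d and .toNat is exact,
-- and d < len(dimension_sizes) so pyGetD with default 0 is exact (Python never raises here)
def generate_corner_points_py (dimension_sizes : List Int) : List (List Int) :=
  if dimension_sizes = [] then []
  else
    let num_dims : Int := dimension_sizes.length
    let num_corners : Int := 2 ^ dimension_sizes.length
    (PySem.List.pyRange 0 num_corners 1).foldl
      (fun corners i =>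
        corners ++ [(PySem.List.pyRange 0 num_dims 1).foldl
          (fun corner d =>
            if (i.toNat >>> d.toNat) &&& 1 = 1 then
              corner ++ [max 0 (PySem.List.pyGetD dimension_sizes d 0 - 1)]
            else
              corner ++ [0]) []])
      []

-- ===== PORT B =====
def generate_corner_points_py_alt (dimension_sizes : List Int) : List (List Int) :=
  if dimension_sizes = [] then []
  else
    dimension_sizes.foldl
      (fun corners size =>
        corners.map (fun c => c ++ [0]) ++ corners.map (fun c => c ++ [max 0 (size - 1)]))
      [[]]

-- ===== PRECONDITION & SPEC =====
def Spec_generate_corner_points_py (dimension_sizes : List Int) (out : List (List Int)) : Prop := out = generate_corner_points_py_alt dimension_sizes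
instance (dimension_sizes : List Int) (out : List (List Int)) : Decidable (Spec_generate_corner_points_py dimension_sizes out) := by unfold Spec_generate_corner_points_py; infer_instance

-- ===== CLAIM (what is proved, stated in full; the proofs are below) =====
def Claim_equal_generate_corner_points_py : Prop := ∀ (dimension_sizes : List Int), Dom_generate_corner_points_py dimension_sizes → Spec_generate_corner_points_py dimension_sizes (generate_corner_points_py dimension_sizes)

-- ===== LEMMAS AND PROOFS =====

-- the corner of xs selected by the bits of i (LSB ↔ first dimension)
def pvCor : List Int → Nat → List Int
  | [], _ => []
  | x :: xs, i => (if i % 2 = 1 then max 0 (x - 1) else 0) :: pvCor xs (i / 2)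

theorem pvCor_high (xs : List Int) : ∀ i : Nat, pvCor xs (i + 2 ^ xs.length) = pvCor xs i := by
  induction xs with
  | nil => intro i; simp [pvCor]
  | cons x xs ih =>
    intro i
    simp only [pvCor, List.length_cons, pow_succ]
    have h1 : (i + 2 ^ xs.length * 2) % 2 = i % 2 := by omega
    have h2 : (i + 2 ^ xs.length * 2) / 2 = i / 2 + 2 ^ xs.length := by omega
    rw [h1, h2, ih]

theorem pvCor_append (x : Int) (xs : List Int) : ∀ i : Nat,
    pvCor (xs ++ [x]) i
      = pvCor xs i ++ [if i / 2 ^ xs.length % 2 = 1 then max 0 (x - 1) else 0] := by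
  induction xs with
  | nil => intro i; simp [pvCor]
  | cons y xs ih =>
    intro i
    simp only [List.cons_append, pvCor, List.length_cons, ih (i / 2)]
    have h : i / 2 / 2 ^ xs.length = i / 2 ^ (xs.length + 1) := by
      rw [Nat.div_div_eq_div_mul, pow_succ']
    rw [h]
    simp

-- B's doubling loop produces exactly the bit-indexed corner list
theorem pvB_fold (xs : List Int) :
    xs.foldl
      (fun corners size =>
        corners.map (fun c => c ++ [0]) ++ corners.map (fun c => c ++ [max 0 (size - 1)]))
      [[]]
      = (List.range (2 ^ xs.length)).map (pvCor xs) := by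
  induction xs using List.reverseRecOn with
  | nil => simp [pvCor]
  | append_singleton xs x ih =>
    rw [List.foldl_append, ih]
    simp only [List.foldl_cons, List.foldl_nil, List.map_map]
    have hlen : (xs ++ [x]).length = xs.length + 1 := by simp
    rw [hlen, pow_succ, mul_two, List.range_add, List.map_append, List.map_map]
    congr 1
    · apply List.map_congr_left
      intro i hi
      have hi' : i < 2 ^ xs.length := List.mem_range.mp hi
      simp only [Function.comp_apply, pvCor_append]
      rw [Nat.div_eq_of_lt hi']
      simp
    · apply List.map_congr_left
      intro j hj
      have hj' : j < 2 ^ xs.length := List.mem_range.mp hj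
      simp only [Function.comp_apply, pvCor_append]
      have hb : (2 ^ xs.length + j) / 2 ^ xs.length % 2 = 1 := by
        rw [Nat.add_div_left _ (by positivity)]
        rw [Nat.div_eq_of_lt hj']
      have hc : pvCor xs (2 ^ xs.length + j) = pvCor xs j := by
        rw [Nat.add_comm, pvCor_high]
      rw [hb, hc]
      simp

-- the bit-tested map form equals pvCor
theorem pvCor_eq_map (xs : List Int) : ∀ i : Nat,
    (List.range xs.length).map
        (fun d => if (i >>> d) &&& 1 = 1 then max 0 (xs.getD d 0 - 1) else 0)
      = pvCor xs i := by
  induction xs with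
  | nil => intro i; simp [pvCor]
  | cons x xs ih =>
    intro i
    simp only [List.length_cons, List.range_succ_eq_map, List.map_cons, List.map_map, pvCor]
    congr 1
    · simp [Nat.and_one_is_mod]
    · rw [← ih (i / 2)]
      apply List.map_congr_left
      intro d _
      simp only [Function.comp_apply, Nat.succ_eq_add_one, List.getD_cons_succ]
      have h : i >>> (d + 1) = (i / 2) >>> d := by
        simp [Nat.shiftRight_eq_div_pow, Nat.div_div_eq_div_mul, pow_succ']
      rw [h]

-- A's nested loops produce the same bit-indexed corner list
theorem pvA_eq (xs : List Int) (h : xs ≠ []) :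
    generate_corner_points_py xs = (List.range (2 ^ xs.length)).map (pvCor xs) := by
  unfold generate_corner_points_py
  rw [if_neg h]
  rw [PySem.List.foldl_append_singleton_eq_map, List.nil_append]
  simp only [PySem.List.pyRange_one, Int.sub_zero, zero_add]
  have hc : ((2 : Int) ^ xs.length).toNat = 2 ^ xs.length := by
    rw [show ((2:Int) ^ xs.length) = ((2 ^ xs.length : Nat) : Int) by push_cast; ring]
    exact Int.toNat_natCast _
  have hd : ((xs.length : Int)).toNat = xs.length := Int.toNat_natCast _
  rw [hc, hd, List.map_map]
  apply List.map_congr_left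
  intro k _
  simp only [Function.comp_apply]
  -- inner loop: if-branches both append exactly one element, so it is a map
  have hinner : ∀ (l : List Int) (acc : List Int),
      l.foldl (fun corner d =>
          if ((k : Int).toNat >>> d.toNat) &&& 1 = 1 then
            corner ++ [max 0 (PySem.List.pyGetD xs d 0 - 1)]
          else corner ++ [0]) acc
        = acc ++ l.map (fun d =>
            if ((k : Int).toNat >>> d.toNat) &&& 1 = 1 then
              max 0 (PySem.List.pyGetD xs d 0 - 1) else 0) := by
    intro l
    induction l with
    | nil => intro acc; simp
    | cons a l ihl =>
      intro acc
      simp only [List.foldl_cons, List.map_cons]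
      by_cases hb : ((k : Int).toNat >>> a.toNat) &&& 1 = 1
      · rw [if_pos hb, ihl, if_pos hb]; simp
      · rw [if_neg hb, ihl, if_neg hb]; simp
  rw [hinner, List.nil_append, List.map_map]
  rw [← pvCor_eq_map xs k]
  apply List.map_congr_left
  intro d _
  simp [Int.toNat_natCast, PySem.List.pyGetD_natCast]

-- ===== VERDICT (by name: the statement is the Claim_ definition above) =====
theorem generate_corner_points_py_spec : Claim_equal_generate_corner_points_py := by
  intro xs _
  unfold Spec_generate_corner_points_py
  by_cases h : xs = []
  · subst h; rfl
  · rw [pvA_eq xs h]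
    unfold generate_corner_points_py_alt
    rw [if_neg h, pvB_fold]
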